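-- pv_equiv track=rewrite | github.com/tomas99batista/FP | semana 8/treino/removeconta.py | remove_e_conta
-- ===== SOURCE A (Python) =====
-- def remove_e_conta(lst, x):
--     l = []
--     s = 0
--     for i in lst:
--         if i != x:
--             l.append(i)
--         else:
--             s += 1
--     return l, s
-- ===== SOURCE B (Python) =====
-- def remove_e_conta(lst, x):
--     s = lst.count(x)
--     l = list(lst)
--     for _ in range(s):
--         l.remove(x)
--     return l, s
-- ===== Notes on version B (the rewrite author's own statement) =====
-- stated objective: alternative
-- what changed: Replaces the fused filter-and-count loop with a count-then-delete algorithm: first count the occurrences with lst.count(x), then delete exactly that many first occurrences with repeated list.remove(x) on a copy.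
import Mathlib
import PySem

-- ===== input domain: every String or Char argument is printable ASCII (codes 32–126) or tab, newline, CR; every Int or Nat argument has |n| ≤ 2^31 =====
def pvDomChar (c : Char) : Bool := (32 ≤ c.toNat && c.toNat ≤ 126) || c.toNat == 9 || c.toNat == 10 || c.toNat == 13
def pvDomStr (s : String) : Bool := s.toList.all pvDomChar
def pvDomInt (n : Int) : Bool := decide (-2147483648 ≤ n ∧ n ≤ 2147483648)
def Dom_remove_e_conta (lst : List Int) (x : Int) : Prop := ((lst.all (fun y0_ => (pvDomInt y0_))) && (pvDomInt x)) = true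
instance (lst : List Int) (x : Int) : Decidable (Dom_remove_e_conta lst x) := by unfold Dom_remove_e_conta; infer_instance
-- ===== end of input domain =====

-- B replaces A's single fused filter-and-count loop with a count-then-delete algorithm
-- (count the occurrences, then delete that many first occurrences); return value only, no mutation.

-- ===== PORT A =====
-- single fused loop: append survivors into l, count matches into s
def pvStepA (x : Int) (st : List Int × Int) (i : Int) : List Int × Int :=
  if i ≠ x then (st.1 ++ [i], st.2) else (st.1, st.2 + 1)

def remove_e_conta (lst : List Int) (x : Int) : List Int × Int :=
  lst.foldl (pvStepA x) ([], 0)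

-- ===== PORT B =====
-- count first, then repeatedly remove the first occurrence that many times
def remove_e_conta_alt (lst : List Int) (x : Int) : List Int × Int :=
  let s : Int := PySem.List.count lst x
  let l := (PySem.List.pyRange 0 s 1).foldl
    (fun acc _ => (PySem.List.remove? acc x).getD acc) lst
  (l, s)

-- ===== PRECONDITION & SPEC =====
def Spec_remove_e_conta (lst : List Int) (x : Int) (out : List Int × Int) : Prop := out = remove_e_conta_alt lst x
instance (lst : List Int) (x : Int) (out : List Int × Int) : Decidable (Spec_remove_e_conta lst x out) := by unfold Spec_remove_e_conta; infer_instance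

-- ===== CLAIM (what is proved, stated in full; the proofs are below) =====
def Claim_equal_remove_e_conta : Prop := ∀ (lst : List Int) (x : Int), Dom_remove_e_conta lst x → Spec_remove_e_conta lst x (remove_e_conta lst x)

-- ===== LEMMAS AND PROOFS =====

-- A's fold in closed form: survivors are the filter, the counter counts the matches
theorem remove_e_conta_foldl (lst : List Int) (x : Int) (l0 : List Int) (s0 : Int) :
    lst.foldl (pvStepA x) (l0, s0)
    = (l0 ++ lst.filter (fun i => i ≠ x), s0 + (lst.count x : Int)) := by
  induction lst generalizing l0 s0 with
  | nil => simp
  | cons a t ih =>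
    rw [List.foldl_cons]
    by_cases h : a = x
    · have hs : pvStepA x (l0, s0) a = (l0, s0 + 1) := by
        unfold pvStepA; rw [if_neg (by simp [h])]
      rw [hs, ih, List.filter_cons, List.count_cons]
      simp [h]
      ring
    · have hs : pvStepA x (l0, s0) a = (l0 ++ [a], s0) := by
        unfold pvStepA; rw [if_pos h]
      rw [hs, ih, List.filter_cons, List.count_cons]
      simp [h, Ne.symm h]

-- a fold with a constant step is function iteration
theorem foldl_const_step (f : List Int → List Int) (L : List Int) (a : List Int) :
    L.foldl (fun acc _ => f acc) a = f^[L.length] a := by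
  induction L generalizing a with
  | nil => simp
  | cons b t ih => simp [List.foldl_cons, ih, Function.iterate_succ_apply]

-- erasing the first occurrence does not change the filter
theorem filter_erase_self (lst : List Int) (x : Int) :
    (lst.erase x).filter (fun i => i ≠ x) = lst.filter (fun i => i ≠ x) := by
  induction lst with
  | nil => simp
  | cons a t ih =>
    by_cases h : a = x
    · subst h; simp [List.erase_cons_head]
    · rw [List.erase_cons_tail (by simp [h]), List.filter_cons, List.filter_cons, ih]

-- removing the first occurrence (count lst x) times yields the filter
theorem iterate_remove_eq_filter (x : Int) :
    ∀ (n : Nat) (lst : List Int), lst.count x = n →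
      (fun acc => (PySem.List.remove? acc x).getD acc)^[n] lst
        = lst.filter (fun i => i ≠ x) := by
  intro n
  induction n with
  | zero =>
    intro lst h
    have hx : x ∉ lst := by simpa using List.count_eq_zero.mp h
    have hf : lst.filter (fun i => i ≠ x) = lst :=
      List.filter_eq_self.mpr (fun a ha => by simp; rintro rfl; exact hx ha)
    rw [Function.iterate_zero_apply]
    exact hf.symm
  | succ n ih =>
    intro lst h
    have hx : x ∈ lst := List.count_pos_iff.mp (by omega)
    rw [Function.iterate_succ_apply, PySem.List.remove?_eq_some_erase lst x hx,
        Option.getD_some,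
        ih (lst.erase x) (by rw [List.count_erase_self]; omega),
        filter_erase_self]

-- ===== VERDICT (by name: the statement is the Claim_ definition above) =====
theorem remove_e_conta_spec : Claim_equal_remove_e_conta := by
  intro lst x _
  unfold Spec_remove_e_conta remove_e_conta remove_e_conta_alt
  rw [remove_e_conta_foldl]
  simp only [List.nil_append, zero_add]
  rw [foldl_const_step, PySem.List.length_pyRange_one]
  have hc : ((PySem.List.count lst x : Int) - 0).toNat = lst.count x := by
    simp [PySem.List.count]
  rw [hc, iterate_remove_eq_filter x (lst.count x) lst rfl]
  simp [PySem.List.count]
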